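-- pv_equiv track=rewrite | github.com/SpamExperts/OrangeAssassin | oa/plugins/bayes.py | _tokenise_mail_addrs
-- ===== SOURCE A (Python) =====
-- def _tokenise_mail_addrs(addr):
--     if "@" not in addr:
--         return
--     local, domain = addr.rsplit("@", 1)
--     yield "U*%s" % local
--     yield "D*%s" % domain
--     while "." in domain:
--         domain = domain.split(".", 1)[1]
--         yield domain
-- ===== SOURCE B (Python) =====
-- def _tokenise_mail_addrs(addr):
--     if "@" not in addr:
--         return
--     local, domain = addr.rsplit("@", 1)
--     parts = domain.split(".")
--     yield "U*%s" % local
--     yield "D*%s" % domain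
--     for i in range(1, len(parts)):
--         yield ".".join(parts[i:])
-- ===== Notes on version B (the rewrite author's own statement) =====
-- stated objective: alternative
-- what changed: A peels one suffix per while-loop iteration with a repeated maxsplit-1 split that rescans the shrinking remainder; B tokenises the domain once into its label list and emits each suffix by joining a slice in a single indexed pass.
import Mathlib
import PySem

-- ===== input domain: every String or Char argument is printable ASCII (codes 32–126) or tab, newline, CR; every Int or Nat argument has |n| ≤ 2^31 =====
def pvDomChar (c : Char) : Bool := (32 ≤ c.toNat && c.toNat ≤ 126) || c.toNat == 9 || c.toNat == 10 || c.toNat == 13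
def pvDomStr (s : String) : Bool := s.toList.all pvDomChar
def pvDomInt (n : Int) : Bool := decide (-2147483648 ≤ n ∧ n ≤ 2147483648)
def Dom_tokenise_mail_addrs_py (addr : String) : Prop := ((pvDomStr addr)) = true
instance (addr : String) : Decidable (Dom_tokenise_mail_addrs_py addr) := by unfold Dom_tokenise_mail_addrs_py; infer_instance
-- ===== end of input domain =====

-- B replaces A's repeated domain.split('.', 1) peeling loop by one split of the domain into
-- a parts list followed by an indexed pass joining parts[i:]; same values, alternative shape.

-- ===== PORT A =====

-- s.rsplit("@", 1) when "@" occurs in s: split at the LAST '@' (hand port, exact there;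
-- both Pythons call the same builtin, so both ports share it)
def pvRsplitAt1 (cs : List Char) : List Char × List Char :=
  let i := (PySem.Chars.rfind cs ['@']).toNat
  (cs.take i, cs.drop (i + 1))

-- the part of l before the first '.' / after the first '.' (proof vocabulary for the lemmas below)
def pvBefore (l : List Char) : List Char := l.takeWhile (· ≠ '.')
def pvAfter (l : List Char) : List Char := (l.dropWhile (· ≠ '.')).tail

-- splitOnMax.go with maxsplit budget 0 returns the remainder at once
theorem pvGoMax0 (fuel : Nat) (l cur : List Char) (acc : List (List Char)) :
    PySem.Chars.splitOnMax.go ['.'] fuel 0 l cur acc = acc.reverse ++ [cur.reverse ++ l] := by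
  cases fuel with
  | zero => simp [PySem.Chars.splitOnMax.go]
  | succ f => cases l <;> simp [PySem.Chars.splitOnMax.go]

-- splitOnMax.go with budget 1 and single-char separator, characterised
theorem pvGoMax1 (fuel : Nat) (l cur : List Char) (acc : List (List Char))
    (h : l.length < fuel) :
    PySem.Chars.splitOnMax.go ['.'] fuel 1 l cur acc =
      acc.reverse ++ (if '.' ∈ l then [cur.reverse ++ pvBefore l, pvAfter l]
                      else [cur.reverse ++ l]) := by
  induction fuel generalizing l cur acc with
  | zero => omega
  | succ f ih =>
    cases l with
    | nil => simp [PySem.Chars.splitOnMax.go]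
    | cons c rest =>
      by_cases hc : c = '.'
      · subst hc
        simp only [PySem.Chars.splitOnMax.go, List.isPrefixOf]
        rw [if_neg (by norm_num : ¬ (1:Nat) = 0), if_pos (by simp)]
        simp [pvGoMax0, pvBefore, pvAfter, List.takeWhile, List.dropWhile]
      · have hlen : rest.length < f := by simpa using h
        simp only [PySem.Chars.splitOnMax.go, List.isPrefixOf]
        rw [if_neg (by norm_num : ¬ (1:Nat) = 0), if_neg (by simp [Ne.symm hc]), ih rest (c :: cur) acc hlen]
        by_cases hr : '.' ∈ rest <;>
          simp [hr, pvBefore, pvAfter, List.takeWhile, List.dropWhile, hc, Ne.symm hc]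

-- Python's domain.split(".", 1) characterised: [before, after] if '.' occurs, else [domain]
theorem pvSplitMax1 (l : List Char) :
    PySem.Chars.splitOnMax l ['.'] 1 =
      if '.' ∈ l then [pvBefore l, pvAfter l] else [l] := by
  have : ¬ ((1:Int) < 0) := by norm_num
  simp only [PySem.Chars.splitOnMax, if_neg this]
  have := pvGoMax1 (l.length + 1) l [] [] (by omega)
  simpa using this

theorem pvAfter_length_lt (l : List Char) (h : '.' ∈ l) :
    (pvAfter l).length < l.length := by
  unfold pvAfter
  have hne : l.dropWhile (· ≠ '.') ≠ [] := by
    intro hnil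
    have h2 := List.dropWhile_eq_nil_iff.mp hnil '.' h
    simp at h2
  have h1 : (l.dropWhile (· ≠ '.')).length ≤ l.length := List.length_dropWhile_le _ _
  have h2 : ((l.dropWhile (· ≠ '.')).tail).length < (l.dropWhile (· ≠ '.')).length := by
    cases hd : l.dropWhile (· ≠ '.') with
    | nil => exact absurd hd hne
    | cons a t => simp
  omega

-- '"." in domain' for a single character is list membership
theorem pvIsInDot (l : List Char) : PySem.Chars.isIn ['.'] l = true ↔ '.' ∈ l := by
  rw [PySem.Chars.isIn_iff_infix]
  constructor
  · rintro ⟨p, s, rfl⟩; simp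
  · intro h
    obtain ⟨p, s, rfl⟩ := List.append_of_mem h
    exact ⟨p, s, by simp⟩

-- the while loop of A: peel the part after the first '.' while one occurs, yielding each remainder
def pvAWhile (domain : List Char) : List (List Char) :=
  if h : PySem.Chars.isIn ['.'] domain = true then
    let d' := (PySem.Chars.splitOnMax domain ['.'] 1).getD 1 []
    d' :: pvAWhile d'
  else []
termination_by domain.length
decreasing_by
  have hm : '.' ∈ domain := (pvIsInDot domain).mp h
  simp only [pvSplitMax1, if_pos hm, List.getD]
  simpa using pvAfter_length_lt domain hm

def tokenise_mail_addrs_py (addr : String) : List String :=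
  if PySem.Str.isIn "@" addr = false then [] else
  let cs := addr.toList
  let p := pvRsplitAt1 cs
  String.mk ('U' :: '*' :: p.1) :: String.mk ('D' :: '*' :: p.2) ::
    (pvAWhile p.2).map String.mk

-- ===== PORT B =====
def tokenise_mail_addrs_py_alt (addr : String) : List String :=
  if PySem.Str.isIn "@" addr = false then [] else
  let cs := addr.toList
  let p := pvRsplitAt1 cs
  let parts := PySem.Chars.splitOn p.2 ['.']
  String.mk ('U' :: '*' :: p.1) :: String.mk ('D' :: '*' :: p.2) ::
    (PySem.List.pyRange 1 (parts.length : Int) 1).map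
      (fun j => String.mk (PySem.Chars.join ['.'] (parts.drop j.toNat)))

-- ===== PRECONDITION & SPEC =====
def Spec_tokenise_mail_addrs_py (addr : String) (out : List String) : Prop := out = tokenise_mail_addrs_py_alt addr
instance (addr : String) (out : List String) : Decidable (Spec_tokenise_mail_addrs_py addr out) := by unfold Spec_tokenise_mail_addrs_py; infer_instance

-- ===== CLAIM (what is proved, stated in full; the proofs are below) =====
def Claim_equal_tokenise_mail_addrs_py : Prop := ∀ (addr : String), Dom_tokenise_mail_addrs_py addr → Spec_tokenise_mail_addrs_py addr (tokenise_mail_addrs_py addr)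

-- ===== LEMMAS AND PROOFS =====

-- simple structural model of domain.split(".")
def pvSplit : List Char → List (List Char)
  | [] => [[]]
  | c :: rest => if c = '.' then [] :: pvSplit rest else (pvSplit rest).modifyHead (c :: ·)

theorem pvGoSplit (fuel : Nat) (l cur : List Char) (acc : List (List Char))
    (h : l.length < fuel) :
    PySem.Chars.splitOn.go ['.'] fuel l cur acc =
      acc.reverse ++ (pvSplit l).modifyHead (cur.reverse ++ ·) := by
  induction fuel generalizing l cur acc with
  | zero => omega
  | succ f ih =>
    cases l with
    | nil => simp [PySem.Chars.splitOn.go, pvSplit]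
    | cons c rest =>
      have hlen : rest.length < f := by simpa using h
      by_cases hc : c = '.'
      · subst hc
        simp only [PySem.Chars.splitOn.go, List.isPrefixOf]
        rw [if_pos (by simp)]
        show PySem.Chars.splitOn.go ['.'] f rest [] (cur.reverse :: acc) = _
        rw [ih rest [] (cur.reverse :: acc) hlen]
        cases hs : pvSplit rest <;> simp [pvSplit, hs]
      · simp only [PySem.Chars.splitOn.go, List.isPrefixOf]
        rw [if_neg (by simp [Ne.symm hc]), ih rest (c :: cur) acc hlen]
        cases hs : pvSplit rest <;> simp [pvSplit, hc, hs]

theorem pvSplitOn_eq (l : List Char) : PySem.Chars.splitOn l ['.'] = pvSplit l := by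
  unfold PySem.Chars.splitOn
  rw [pvGoSplit (l.length + 1) l [] [] (by omega)]
  cases hs : pvSplit l <;> simp

theorem pvSplit_ne_nil (l : List Char) : pvSplit l ≠ [] := by
  induction l with
  | nil => simp [pvSplit]
  | cons c rest ih =>
    simp only [pvSplit]
    split
    · simp
    · cases hs : pvSplit rest with
      | nil => exact absurd hs ih
      | cons a t => simp

theorem pvSplit_no_dot (l : List Char) (h : '.' ∉ l) : pvSplit l = [l] := by
  induction l with
  | nil => rfl
  | cons c rest ih =>
    have hc : c ≠ '.' := fun hc => h (by simp [hc])
    have hr : '.' ∉ rest := fun hm => h (by simp [hm])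
    simp [pvSplit, hc, ih hr]

theorem pvSplit_dot (l : List Char) (h : '.' ∈ l) :
    pvSplit l = pvBefore l :: pvSplit (pvAfter l) := by
  induction l with
  | nil => simp at h
  | cons c rest ih =>
    by_cases hc : c = '.'
    · subst hc
      simp [pvSplit, pvBefore, pvAfter, List.takeWhile, List.dropWhile]
    · have hr : '.' ∈ rest := by
        rcases List.mem_cons.mp h with h1 | h1
        · exact absurd h1.symm hc
        · exact h1
      have := ih hr
      simp only [pvSplit, if_neg hc, this, pvBefore, pvAfter, List.takeWhile, List.dropWhile]
      simp [hc]

theorem pvJoin_pvSplit (l : List Char) : PySem.Chars.join ['.'] (pvSplit l) = l := by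
  induction l with
  | nil => rfl
  | cons c rest ih =>
    cases hs : pvSplit rest with
    | nil => exact absurd hs (pvSplit_ne_nil rest)
    | cons a t =>
      rw [hs] at ih
      by_cases hc : c = '.'
      · subst hc
        rw [show pvSplit ('.' :: rest) = [] :: a :: t by simp [pvSplit, hs]]
        rw [PySem.Chars.join_cons_cons]
        simp [ih]
      · simp only [pvSplit, if_neg hc, hs, List.modifyHead]
        cases t with
        | nil =>
          rw [PySem.Chars.join_singleton] at ih ⊢
          simp [ih]
        | cons b u =>
          rw [PySem.Chars.join_cons_cons] at ih ⊢
          simp [ih]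

-- the suffix-join list over a parts tail
def pvG (rest : List (List Char)) : List (List Char) :=
  (List.range rest.length).map (fun k => PySem.Chars.join ['.'] (rest.drop k))

theorem pvG_cons (a : List Char) (rest : List (List Char)) :
    pvG (a :: rest) = PySem.Chars.join ['.'] (a :: rest) :: pvG rest := by
  unfold pvG
  rw [List.length_cons, List.range_succ_eq_map]
  simp

-- A's while loop equals the suffix-join list of the split's tail
theorem pvAWhile_eq (d : List Char) : pvAWhile d = pvG (pvSplit d).tail := by
  by_cases h : '.' ∈ d
  · have hIs : PySem.Chars.isIn ['.'] d = true := (pvIsInDot d).mpr h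
    rw [pvAWhile, dif_pos hIs]
    have hd' : (PySem.Chars.splitOnMax d ['.'] 1).getD 1 [] = pvAfter d := by
      simp [pvSplitMax1, h]
    show (PySem.Chars.splitOnMax d ['.'] 1).getD 1 [] ::
        pvAWhile ((PySem.Chars.splitOnMax d ['.'] 1).getD 1 []) = pvG (pvSplit d).tail
    rw [hd']
    have ih := pvAWhile_eq (pvAfter d)
    rw [ih, pvSplit_dot d h]
    cases hs : pvSplit (pvAfter d) with
    | nil => exact absurd hs (pvSplit_ne_nil _)
    | cons a t =>
      have hj : PySem.Chars.join ['.'] (a :: t) = pvAfter d := by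
        rw [← hs, pvJoin_pvSplit]
      simp [pvG_cons, hj]
  · have hIs : ¬ PySem.Chars.isIn ['.'] d = true := fun hc => h ((pvIsInDot d).mp hc)
    rw [pvAWhile, dif_neg hIs, pvSplit_no_dot d h]
    rfl
termination_by d.length
decreasing_by
  exact pvAfter_length_lt d h

-- B's indexed pyRange pass equals the same suffix-join list
theorem pvB_suffixes (parts : List (List Char)) (hne : parts ≠ []) :
    (PySem.List.pyRange 1 (parts.length : Int) 1).map
      (fun j => PySem.Chars.join ['.'] (parts.drop j.toNat)) = pvG parts.tail := by
  cases parts with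
  | nil => exact absurd rfl hne
  | cons a rest =>
    rw [PySem.List.pyRange_one]
    have hlen : ((rest.length + 1 : Int) - 1).toNat = rest.length := by omega
    simp only [List.length_cons]
    rw [show ((rest.length + 1 : Nat) : Int) - 1 = (rest.length : Int) by push_cast; ring]
    simp only [Int.toNat_natCast, List.map_map, pvG]
    apply List.map_congr_left
    intro k hk
    simp only [Function.comp_apply]
    congr 1
    have : ((1 : Int) + k).toNat = k + 1 := by omega
    rw [this]
    simp

-- ===== VERDICT (by name: the statement is the Claim_ definition above) =====
theorem tokenise_mail_addrs_py_spec : Claim_equal_tokenise_mail_addrs_py := by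
  intro addr _
  unfold Spec_tokenise_mail_addrs_py tokenise_mail_addrs_py tokenise_mail_addrs_py_alt
  by_cases h : PySem.Str.isIn "@" addr = false
  · rw [if_pos h, if_pos h]
  · rw [if_neg h, if_neg h]
    refine congrArg _ (congrArg _ ?_)
    rw [pvAWhile_eq, pvSplitOn_eq,
      ← pvB_suffixes (pvSplit (pvRsplitAt1 addr.toList).2) (pvSplit_ne_nil _), List.map_map]
    simp [Function.comp]
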